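-- pv_equiv track=rewrite | github.com/FessDemon/pim | python/lab_3_2.py | findLongestDecreasingSequences
-- ===== SOURCE A (Python) =====
-- def findLongestDecreasingSequences(numbers):
--     if not numbers:
--         return [], 0, []
--
--     longestSequences = []
--     maxLength = 0
--     currentSequence = []
--
--     for i in range(len(numbers)):
--         if i == 0 or numbers[i] < numbers[i - 1]:
--             currentSequence.append(numbers[i])
--         else:
--             if len(currentSequence) > maxLength:
--                 maxLength = len(currentSequence)
--                 longestSequences = [currentSequence]
--             elif len(currentSequence) == maxLength:
--                 longestSequences.append(currentSequence)
--             currentSequence = [numbers[i]]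
--
--     # Проверка последней последовательности
--     if len(currentSequence) > maxLength:
--         longestSequences = [currentSequence]
--         maxLength = len(currentSequence)
--     elif len(currentSequence) == maxLength:
--         longestSequences.append(currentSequence)
--
--     return longestSequences, maxLength
-- ===== SOURCE B (Python) =====
-- def findLongestDecreasingSequences(numbers):
--     # Phase 1: segment into maximal strictly-decreasing consecutive runs.
--     runs = []
--     for x in numbers:
--         if runs and x < runs[-1][-1]:
--             runs[-1].append(x)
--         else:
--             runs.append([x])
--     # Phase 2: pick the runs of maximal length, in order of appearance.
--     maxLength = max((len(r) for r in runs), default=0)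
--     return [r for r in runs if len(r) == maxLength], maxLength
-- ===== Notes on version B (the rewrite author's own statement) =====
-- stated objective: simpler
-- what changed: B separates the work into two phases: one pass segments the list into all maximal strictly-decreasing runs, then a max over run lengths and a filter select the longest runs, replacing A's single loop that interleaves run building with incremental max/list bookkeeping and a duplicated post-loop merge.
-- outside the precondition, e.g. on findLongestDecreasingSequences([]): A returns ([], 0, []), B returns ([], 0)
import Mathlib
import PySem

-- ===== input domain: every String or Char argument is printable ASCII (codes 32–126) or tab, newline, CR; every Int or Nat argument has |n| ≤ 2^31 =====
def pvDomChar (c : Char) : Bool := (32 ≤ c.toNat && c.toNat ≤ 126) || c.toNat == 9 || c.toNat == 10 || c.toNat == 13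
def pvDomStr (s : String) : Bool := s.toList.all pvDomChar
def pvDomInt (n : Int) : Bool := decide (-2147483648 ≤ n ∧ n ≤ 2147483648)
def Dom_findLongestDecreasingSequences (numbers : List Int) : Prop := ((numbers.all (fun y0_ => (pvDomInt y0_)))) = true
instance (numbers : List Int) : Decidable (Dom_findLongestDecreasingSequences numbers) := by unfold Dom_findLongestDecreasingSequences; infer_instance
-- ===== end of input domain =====

-- B: two-phase re-implementation — segment into maximal strictly-decreasing runs, then select the
-- longest by a max + filter (objective: simpler); A's return value equals B's on every non-empty list.


-- ===== PORT A =====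
-- one iteration of A's for-loop; state = (longestSequences, maxLength, currentSequence)
def pvStepA (numbers : List Int) (s : List (List Int) × Int × List Int) (i : Nat) :
    List (List Int) × Int × List Int :=
  if i = 0 ∨ numbers.getD i 0 < numbers.getD (i - 1) 0 then
    (s.1, s.2.1, s.2.2 ++ [numbers.getD i 0])
  else if (s.2.2.length : Int) > s.2.1 then ([s.2.2], (s.2.2.length : Int), [numbers.getD i 0])
  else if (s.2.2.length : Int) = s.2.1 then (s.1 ++ [s.2.2], s.2.1, [numbers.getD i 0])
  else (s.1, s.2.1, [numbers.getD i 0])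

def findLongestDecreasingSequences (numbers : List Int) : List (List Int) × Int :=
  if numbers = [] then ([], 0)
    -- Python A returns the 3-tuple ([], 0, []) here, not a value of the declared pair type;
    -- this input is excluded by Pre_ below.
  else
    let s := (List.range numbers.length).foldl (pvStepA numbers) ([], 0, [])
    if (s.2.2.length : Int) > s.2.1 then ([s.2.2], (s.2.2.length : Int))
    else if (s.2.2.length : Int) = s.2.1 then (s.1 ++ [s.2.2], s.2.1)
    else (s.1, s.2.1)

-- ===== PORT B =====
-- one iteration of B's segmenting pass: extend the last run or start a new one
def pvStepB (runs : List (List Int)) (x : Int) : List (List Int) :=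
  match runs.getLast? with
  | none => runs ++ [[x]]
  | some r => if x < r.getLastD 0 then runs.dropLast ++ [r ++ [x]] else runs ++ [[x]]

def findLongestDecreasingSequences_alt (numbers : List Int) : List (List Int) × Int :=
  let runs := numbers.foldl pvStepB []
  let maxLength := (runs.map (fun r => (r.length : Int))).foldl max 0
  (runs.filter (fun r => (r.length : Int) = maxLength), maxLength)

-- ===== PRECONDITION & SPEC =====
-- Pre_ excludes only the empty list: there Python A returns a 3-tuple ([], 0, []) instead of a
-- pair, a value outside the declared return type List (List Int) × Int.
def Pre_findLongestDecreasingSequences (numbers : List Int) : Prop := numbers ≠ []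
instance (numbers : List Int) : Decidable (Pre_findLongestDecreasingSequences numbers) := by
  unfold Pre_findLongestDecreasingSequences; infer_instance

def pvWitness_findLongestDecreasingSequences : List Int := [3, 2, 1, 5, 4]

def Spec_findLongestDecreasingSequences (numbers : List Int) (out : List (List Int) × Int) : Prop := out = findLongestDecreasingSequences_alt numbers
instance (numbers : List Int) (out : List (List Int) × Int) : Decidable (Spec_findLongestDecreasingSequences numbers out) := by unfold Spec_findLongestDecreasingSequences; infer_instance

-- ===== CLAIM (what is proved, stated in full; the proofs are below) =====
def Claim_equal_findLongestDecreasingSequences : Prop := ∀ (numbers : List Int), Dom_findLongestDecreasingSequences numbers → Pre_findLongestDecreasingSequences numbers → Spec_findLongestDecreasingSequences numbers (findLongestDecreasingSequences numbers)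

-- ===== LEMMAS AND PROOFS =====

-- A's run-closing update, as a standalone function on (longestSequences, maxLength)
def pvMerge (s : List (List Int) × Int) (r : List Int) : List (List Int) × Int :=
  if (r.length : Int) > s.2 then ([r], (r.length : Int))
  else if (r.length : Int) = s.2 then (s.1 ++ [r], s.2)
  else s

def pvMaxLen (rs : List (List Int)) : Int := (rs.map (fun r => (r.length : Int))).foldl max 0

lemma foldl_max_le {l : List Int} {a x : Int} (hx : x ∈ l) : x ≤ l.foldl max a := by
  induction l generalizing a with
  | nil => cases hx
  | cons b t ih =>
    rcases List.mem_cons.1 hx with h | h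
    · subst h
      have : x ⊔ a ≤ t.foldl max (max a x) := by
        have : ∀ (c : Int) (t : List Int), c ≤ t.foldl max c := by
          intro c t
          induction t generalizing c with
          | nil => simp
          | cons d u ihd => exact le_trans (le_max_left c d) (ihd (max c d))
        exact le_trans (by simp [max_comm]) (this _ _)
      exact le_trans (le_max_left x a) this
    · exact ih h

-- foldl pvMerge over a run list computes exactly (runs of maximal length, max length)
lemma merge_fold (rs : List (List Int)) :
    rs.foldl pvMerge ([], 0) =
      (rs.filter (fun r => (r.length : Int) = pvMaxLen rs), pvMaxLen rs) := by
  induction rs using List.reverseRecOn with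
  | nil => simp [pvMaxLen]
  | append_singleton rs' r ih =>
    have hM : pvMaxLen (rs' ++ [r]) = max (pvMaxLen rs') (r.length : Int) := by
      simp [pvMaxLen, List.foldl_append]
    have hbound : ∀ r' ∈ rs', (r'.length : Int) ≤ pvMaxLen rs' := by
      intro r' hr'
      exact foldl_max_le (List.mem_map_of_mem hr')
    rw [List.foldl_append, ih]
    simp only [List.foldl_cons, List.foldl_nil]
    rcases lt_trichotomy (pvMaxLen rs') ((r.length : Int)) with h1 | h1 | h1
    · -- the new run is strictly longest
      have hM' : pvMaxLen (rs' ++ [r]) = (r.length : Int) := by rw [hM]; omega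
      have hnil : rs'.filter (fun r' => ((r'.length : Int) = pvMaxLen (rs' ++ [r]) : Prop)) = [] := by
        rw [List.filter_eq_nil_iff]
        intro r' hr'
        have := hbound r' hr'
        simp only [hM', decide_eq_true_eq]
        omega
      rw [show pvMerge (rs'.filter (fun r' => ((r'.length : Int) = pvMaxLen rs' : Prop)), pvMaxLen rs') r
            = ([r], (r.length : Int)) by simp [pvMerge, h1]]
      rw [List.filter_append, hnil, hM']
      simp
    · -- the new run ties the maximum
      have hM' : pvMaxLen (rs' ++ [r]) = pvMaxLen rs' := by rw [hM]; omega
      rw [show pvMerge (rs'.filter (fun r' => ((r'.length : Int) = pvMaxLen rs' : Prop)), pvMaxLen rs') r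
            = (rs'.filter (fun r' => ((r'.length : Int) = pvMaxLen rs' : Prop)) ++ [r], pvMaxLen rs') by
          simp [pvMerge, h1]]
      rw [List.filter_append, hM']
      simp [h1]
    · -- the new run is shorter than the maximum
      have hM' : pvMaxLen (rs' ++ [r]) = pvMaxLen rs' := by rw [hM]; omega
      rw [show pvMerge (rs'.filter (fun r' => ((r'.length : Int) = pvMaxLen rs' : Prop)), pvMaxLen rs') r
            = (rs'.filter (fun r' => ((r'.length : Int) = pvMaxLen rs' : Prop)), pvMaxLen rs') by
          unfold pvMerge
          rw [if_neg (by simp; omega), if_neg (by simp; omega)]]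
      rw [List.filter_append, hM']
      have : List.filter (fun r' => ((r'.length : Int) = pvMaxLen rs' : Prop)) [r] = [] := by
        simp
        omega
      rw [this, List.append_nil]

-- A's loop state after m iterations
def pvA (numbers : List Int) (m : Nat) : List (List Int) × Int × List Int :=
  (List.range m).foldl (pvStepA numbers) ([], 0, [])

-- B's run list on the length-m prefix
def pvB (numbers : List Int) (m : Nat) : List (List Int) :=
  (numbers.take m).foldl pvStepB []

lemma pvA_succ (numbers : List Int) (m : Nat) :
    pvA numbers (m + 1) = pvStepA numbers (pvA numbers m) m := by
  simp [pvA, List.range_succ, List.foldl_append]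

lemma pvB_succ (numbers : List Int) (m : Nat) (hm : m < numbers.length) :
    pvB numbers (m + 1) = pvStepB (pvB numbers m) (numbers.getD m 0) := by
  have : numbers.take (m + 1) = numbers.take m ++ [numbers.getD m 0] := by
    rw [List.take_succ]
    congr 1
    simp [List.getElem?_eq_getElem hm, List.getD]
  simp [pvB, this, List.foldl_append]

-- The loop invariant: A's state is (merge-fold of all closed runs, the currently open run),
-- where B's segmentation of the prefix is exactly (closed runs ++ [open run]).
lemma invariant (numbers : List Int) :
    ∀ m, 1 ≤ m → m ≤ numbers.length →
      ∃ rs' cur, pvB numbers m = rs' ++ [cur] ∧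
        pvA numbers m = ((rs'.foldl pvMerge ([], 0)).1, (rs'.foldl pvMerge ([], 0)).2, cur) ∧
        cur.getLastD 0 = numbers.getD (m - 1) 0 := by
  intro m
  induction m with
  | zero => omega
  | succ m ih =>
    intro _ hle
    by_cases hm : m = 0
    · subst hm
      refine ⟨[], [numbers.getD 0 0], ?_, ?_, by simp⟩
      · have h0 : 0 < numbers.length := by omega
        rw [pvB_succ numbers 0 h0]
        simp [pvB, pvStepB]
      · rw [pvA_succ]
        simp [pvA, pvStepA]
    · have hm1 : 1 ≤ m := by omega
      have hmlt : m < numbers.length := by omega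
      obtain ⟨rs', cur, hB, hA, hlast⟩ := ih hm1 (by omega)
      rw [pvA_succ, pvB_succ numbers m hmlt, hB, hA]
      by_cases hc : numbers.getD m 0 < numbers.getD (m - 1) 0
      · -- the run continues
        refine ⟨rs', cur ++ [numbers.getD m 0], ?_, ?_, by simp⟩
        · simp only [pvStepB, List.getLast?_concat, hlast]
          rw [if_pos hc, List.dropLast_concat]
        · simp only [pvStepA]
          rw [if_pos (Or.inr hc)]
      · -- the run closes; A merges cur, B starts a fresh run
        refine ⟨rs' ++ [cur], [numbers.getD m 0], ?_, ?_, by simp⟩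
        · simp only [pvStepB, List.getLast?_concat, hlast]
          rw [if_neg hc]
        · rw [List.foldl_append]
          simp only [List.foldl_cons, List.foldl_nil]
          simp only [pvStepA, hm, false_or, hc, if_false, pvMerge]
          split_ifs <;> simp_all

-- ===== VERDICT (by name: the statement is the Claim_ definition above) =====
theorem findLongestDecreasingSequences_spec : Claim_equal_findLongestDecreasingSequences := by
  intro numbers _ hpre
  unfold Spec_findLongestDecreasingSequences
  have hlen : 1 ≤ numbers.length := by
    cases numbers with
    | nil => exact absurd rfl hpre
    | cons a t => simp
  obtain ⟨rs', cur, hB, hA, _⟩ := invariant numbers numbers.length hlen le_rfl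
  have hruns : numbers.foldl pvStepB [] = rs' ++ [cur] := by
    simpa [pvB, List.take_length] using hB
  have hAval : findLongestDecreasingSequences numbers =
      (rs' ++ [cur]).foldl pvMerge ([], 0) := by
    unfold findLongestDecreasingSequences
    rw [if_neg hpre]
    show (if _ then _ else _) = _
    rw [show (List.range numbers.length).foldl (pvStepA numbers) ([], 0, []) = pvA numbers numbers.length from rfl, hA]
    rw [List.foldl_append]
    simp only [List.foldl_cons, List.foldl_nil, pvMerge]
  have hBval : findLongestDecreasingSequences_alt numbers =
      ((rs' ++ [cur]).filter (fun r => ((r.length : Int) = pvMaxLen (rs' ++ [cur]) : Prop)),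
        pvMaxLen (rs' ++ [cur])) := by
    unfold findLongestDecreasingSequences_alt
    rw [hruns]
    rfl
  rw [hAval, merge_fold, hBval]
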